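-- pv_equiv track=rewrite | github.com/AntoineLevyy/draftAI | backend/college/njcaa/balanced_search_photos.py | is_balanced_relevant
-- ===== SOURCE A (Python) =====
-- def is_balanced_relevant(image_url: str, title: str, snippet: str, player_name: str, school_name: str) -> bool:
--     """Check if an image seems relevant using balanced criteria."""
--     # Convert to lowercase for comparison
--     title_lower = title.lower()
--     snippet_lower = snippet.lower()
--     player_lower = player_name.lower()
--     school_lower = school_name.lower()
--
--     # Check if player name appears (at least first or last name)
--     name_parts = player_lower.split()
--     first_name = name_parts[0] if name_parts else ""
--     last_name = name_parts[-1] if len(name_parts) > 1 else ""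
--
--     # Check for name matches
--     has_first_name = first_name in title_lower or first_name in snippet_lower
--     has_last_name = last_name in title_lower or last_name in snippet_lower
--     has_full_name = player_lower in title_lower or player_lower in snippet_lower
--
--     # Check for school context
--     has_school = school_lower in title_lower or school_lower in snippet_lower
--
--     # Check for soccer context
--     soccer_terms = ['soccer', 'football', 'athlete', 'player', 'team', 'roster', 'college', 'university']
--     has_soccer_context = any(term in title_lower or term in snippet_lower for term in soccer_terms)
--
--     # Balanced scoring - more lenient than before
--     score = 0
--     if has_full_name: score += 4
--     elif has_first_name and has_last_name: score += 3
--     elif has_first_name or has_last_name: score += 2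
--     if has_school: score += 2
--     if has_soccer_context: score += 1
--
--     # Lower threshold for relevance
--     return score >= 2
-- ===== SOURCE B (Python) =====
-- def is_balanced_relevant(image_url: str, title: str, snippet: str, player_name: str, school_name: str) -> bool:
--     """Same relevance test, closed-form: any name match or a school match already
--     clears the threshold of 2, and soccer context alone (worth 1) never can, so the
--     score/elif cascade collapses to a single boolean expression."""
--     title_lower = title.lower()
--     snippet_lower = snippet.lower()
--     player_lower = player_name.lower()
--     school_lower = school_name.lower()
--
--     name_parts = player_lower.split()
--     first_name = name_parts[0] if name_parts else ""
--     last_name = name_parts[-1] if len(name_parts) > 1 else ""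
--
--     def seen(term):
--         return term in title_lower or term in snippet_lower
--
--     return seen(player_lower) or seen(first_name) or seen(last_name) or seen(school_lower)
-- ===== Notes on version B (the rewrite author's own statement) =====
-- stated objective: simpler
-- what changed: Replaced the integer score, the if/elif cascade, the soccer-terms scan and the threshold comparison by the equivalent closed-form boolean 'full-name or first-name or last-name or school match' (any of these already scores >= 2, and soccer context alone never reaches 2).
import Mathlib
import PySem

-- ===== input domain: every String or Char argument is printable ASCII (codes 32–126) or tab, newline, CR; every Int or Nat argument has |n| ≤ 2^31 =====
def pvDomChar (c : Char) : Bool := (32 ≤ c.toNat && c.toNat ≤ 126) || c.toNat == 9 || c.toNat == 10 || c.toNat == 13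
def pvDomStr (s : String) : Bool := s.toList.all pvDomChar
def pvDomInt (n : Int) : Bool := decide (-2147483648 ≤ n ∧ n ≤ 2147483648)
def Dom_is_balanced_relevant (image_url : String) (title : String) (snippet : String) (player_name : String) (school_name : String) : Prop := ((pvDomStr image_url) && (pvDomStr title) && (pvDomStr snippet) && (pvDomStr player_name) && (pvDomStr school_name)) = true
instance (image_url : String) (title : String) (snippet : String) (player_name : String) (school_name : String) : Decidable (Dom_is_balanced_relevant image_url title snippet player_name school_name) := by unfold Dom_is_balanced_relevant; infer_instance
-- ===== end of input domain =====

-- B replaces A's integer score, if/elif cascade and soccer-terms scan by the equivalent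
-- closed-form boolean 'full-name or first-name or last-name or school match' (simpler).

-- ===== PORT A =====
def is_balanced_relevant (image_url : String) (title : String) (snippet : String) (player_name : String) (school_name : String) : Bool :=
  let title_lower := PySem.Str.lower title
  let snippet_lower := PySem.Str.lower snippet
  let player_lower := PySem.Str.lower player_name
  let school_lower := PySem.Str.lower school_name
  let name_parts := PySem.Str.split₀ player_lower
  let first_name := if name_parts ≠ [] then name_parts.headD "" else ""
  let last_name := if name_parts.length > 1 then name_parts.getLastD "" else ""
  let has_first_name := PySem.Str.isIn first_name title_lower || PySem.Str.isIn first_name snippet_lower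
  let has_last_name := PySem.Str.isIn last_name title_lower || PySem.Str.isIn last_name snippet_lower
  let has_full_name := PySem.Str.isIn player_lower title_lower || PySem.Str.isIn player_lower snippet_lower
  let has_school := PySem.Str.isIn school_lower title_lower || PySem.Str.isIn school_lower snippet_lower
  let soccer_terms := ["soccer", "football", "athlete", "player", "team", "roster", "college", "university"]
  let has_soccer_context := soccer_terms.any (fun term => PySem.Str.isIn term title_lower || PySem.Str.isIn term snippet_lower)
  let score : Int := 0
  let score := if has_full_name then score + 4
               else if has_first_name && has_last_name then score + 3
               else if has_first_name || has_last_name then score + 2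
               else score
  let score := if has_school then score + 2 else score
  let score := if has_soccer_context then score + 1 else score
  decide (score ≥ 2)

-- ===== PORT B =====
def pvSeen (term : String) (title_lower : String) (snippet_lower : String) : Bool :=
  PySem.Str.isIn term title_lower || PySem.Str.isIn term snippet_lower

def is_balanced_relevant_alt (image_url : String) (title : String) (snippet : String) (player_name : String) (school_name : String) : Bool :=
  let title_lower := PySem.Str.lower title
  let snippet_lower := PySem.Str.lower snippet
  let player_lower := PySem.Str.lower player_name
  let school_lower := PySem.Str.lower school_name
  let name_parts := PySem.Str.split₀ player_lower
  let first_name := if name_parts ≠ [] then name_parts.headD "" else ""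
  let last_name := if name_parts.length > 1 then name_parts.getLastD "" else ""
  pvSeen player_lower title_lower snippet_lower ||
  pvSeen first_name title_lower snippet_lower ||
  pvSeen last_name title_lower snippet_lower ||
  pvSeen school_lower title_lower snippet_lower

-- ===== PRECONDITION & SPEC =====
def Spec_is_balanced_relevant (image_url : String) (title : String) (snippet : String) (player_name : String) (school_name : String) (out : Bool) : Prop := out = is_balanced_relevant_alt image_url title snippet player_name school_name
instance (image_url : String) (title : String) (snippet : String) (player_name : String) (school_name : String) (out : Bool) : Decidable (Spec_is_balanced_relevant image_url title snippet player_name school_name out) := by unfold Spec_is_balanced_relevant; infer_instance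

-- ===== CLAIM (what is proved, stated in full; the proofs are below) =====
def Claim_equal_is_balanced_relevant : Prop := ∀ (image_url : String) (title : String) (snippet : String) (player_name : String) (school_name : String), Dom_is_balanced_relevant image_url title snippet player_name school_name → Spec_is_balanced_relevant image_url title snippet player_name school_name (is_balanced_relevant image_url title snippet player_name school_name)

-- ===== LEMMAS AND PROOFS =====

-- ===== VERDICT (by name: the statement is the Claim_ definition above) =====
theorem is_balanced_relevant_spec : Claim_equal_is_balanced_relevant := by
  intro image_url title snippet player_name school_name _
  unfold Spec_is_balanced_relevant is_balanced_relevant is_balanced_relevant_alt pvSeen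
  cases hfull : PySem.Str.isIn (PySem.Str.lower player_name) (PySem.Str.lower title) || PySem.Str.isIn (PySem.Str.lower player_name) (PySem.Str.lower snippet) <;>
  cases hfst : (PySem.Str.isIn (if PySem.Str.split₀ (PySem.Str.lower player_name) ≠ [] then (PySem.Str.split₀ (PySem.Str.lower player_name)).headD "" else "") (PySem.Str.lower title) || PySem.Str.isIn (if PySem.Str.split₀ (PySem.Str.lower player_name) ≠ [] then (PySem.Str.split₀ (PySem.Str.lower player_name)).headD "" else "") (PySem.Str.lower snippet)) <;>
  cases hlst : (PySem.Str.isIn (if (PySem.Str.split₀ (PySem.Str.lower player_name)).length > 1 then (PySem.Str.split₀ (PySem.Str.lower player_name)).getLastD "" else "") (PySem.Str.lower title) || PySem.Str.isIn (if (PySem.Str.split₀ (PySem.Str.lower player_name)).length > 1 then (PySem.Str.split₀ (PySem.Str.lower player_name)).getLastD "" else "") (PySem.Str.lower snippet)) <;>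
  cases hsch : (PySem.Str.isIn (PySem.Str.lower school_name) (PySem.Str.lower title) || PySem.Str.isIn (PySem.Str.lower school_name) (PySem.Str.lower snippet)) <;>
  simp only [hfull, hfst, hlst, hsch, Bool.false_or, Bool.or_false, Bool.true_or, Bool.or_true, Bool.true_and, Bool.false_and, if_true, if_false, Bool.and_self] <;>
  split <;> decide
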